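-- pv_equiv track=rewrite | github.com/John3210of/AnyPrac | 9rogramers/161988.py | solution
-- ===== SOURCE A (Python) =====
-- def solution(sequence):
--     pulse = [1,-1]
--
--     n_sequence = [pulse[i%2-1]*sequence[i] for i in range(len(sequence))]
--     p_sequence = [pulse[i%2]*sequence[i] for i in range(len(sequence))]
--     dp_n=[0]*len(sequence)
--     dp_p=[0]*len(sequence)
--
--     dp_n[0] = n_sequence[0]
--     dp_p[0] = p_sequence[0]
--
--     for i in range(1,len(n_sequence)):
--         dp_n[i] = max(n_sequence[i],dp_n[i-1]+n_sequence[i])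
--         dp_p[i] = max(p_sequence[i],dp_p[i-1]+p_sequence[i])
--
--
--     return max(dp_n+dp_p)
-- ===== SOURCE B (Python) =====
-- def solution(sequence):
--     # Prefix-sum formulation: with p[i] = sequence[i] for even i and -sequence[i]
--     # for odd i, every alternating-sign subarray sum is +/-(P[j]-P[i]) for prefix
--     # sums P of p, so the answer is max(P) - min(P).
--     total = 0
--     prefixes = [0]
--     sign = 1
--     for x in sequence:
--         total += sign * x
--         prefixes.append(total)
--         sign = -sign
--     return max(prefixes) - min(prefixes)
-- ===== Notes on version B (the rewrite author's own statement) =====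
-- stated objective: alternative
-- what changed: A runs Kadane's DP twice (two sign-transformed copies of the input, two dp arrays, max over their concatenation); B uses no Kadane recurrence at all: it builds the prefix sums of the single alternating-sign transform and returns max(prefixes) - min(prefixes), correct because every alternating subarray sum under either sign convention is +/-(P[j]-P[i]).
import Mathlib
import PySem

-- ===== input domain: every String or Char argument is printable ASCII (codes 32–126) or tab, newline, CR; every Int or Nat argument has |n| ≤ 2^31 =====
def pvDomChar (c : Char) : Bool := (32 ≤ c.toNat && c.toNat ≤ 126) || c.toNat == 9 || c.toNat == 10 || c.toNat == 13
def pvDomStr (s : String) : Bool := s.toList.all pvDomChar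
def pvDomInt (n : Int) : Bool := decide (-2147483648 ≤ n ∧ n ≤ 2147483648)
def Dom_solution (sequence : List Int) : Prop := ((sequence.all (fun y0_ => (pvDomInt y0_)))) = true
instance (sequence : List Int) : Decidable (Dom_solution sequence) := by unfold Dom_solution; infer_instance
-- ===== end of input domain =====

-- B replaces A's double Kadane DP by prefix sums of the alternating-sign transform,
-- returning max(prefixes) - min(prefixes) (objective: alternative algorithm).

-- ===== PORT A =====
-- Literal port of A. The dp arrays are kept in REVERSE construction order (head = the most
-- recently written cell, i.e. dp[i-1]); the final max over all cells is order-independent.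
-- pyGetD's default 0 is only reached on [], where Python raises IndexError (outside Pre_).
def solution (sequence : List Int) : Int :=
  let pulse : List Int := [1, -1]
  let n_sequence := (PySem.List.pyRange 0 (sequence.length : Int) 1).map
      (fun i => PySem.List.pyGetD pulse (PySem.Int.mod i 2 - 1) 0 * PySem.List.pyGetD sequence i 0)
  let p_sequence := (PySem.List.pyRange 0 (sequence.length : Int) 1).map
      (fun i => PySem.List.pyGetD pulse (PySem.Int.mod i 2) 0 * PySem.List.pyGetD sequence i 0)
  let dps := (PySem.List.pyRange 1 (n_sequence.length : Int) 1).foldl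
      (fun (st : List Int × List Int) i =>
        (max (PySem.List.pyGetD n_sequence i 0) (st.1.headD 0 + PySem.List.pyGetD n_sequence i 0) :: st.1,
         max (PySem.List.pyGetD p_sequence i 0) (st.2.headD 0 + PySem.List.pyGetD p_sequence i 0) :: st.2))
      ([PySem.List.pyGetD n_sequence 0 0], [PySem.List.pyGetD p_sequence 0 0])
  (PySem.List.max? (dps.1 ++ dps.2) (fun y => y)).getD 0

-- ===== PORT B =====
-- state = (total, prefixes, sign); prefixes grows by append as in Source B
def solution_alt (sequence : List Int) : Int :=
  let st := sequence.foldl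
      (fun (st : Int × List Int × Int) x =>
        let t := st.1 + st.2.2 * x
        (t, st.2.1 ++ [t], -st.2.2))
      (0, [0], 1)
  (PySem.List.max? st.2.1 (fun y => y)).getD 0 - (PySem.List.min? st.2.1 (fun y => y)).getD 0

-- ===== PRECONDITION & SPEC =====
-- A raises IndexError (dp_n[0] on an empty dp array) iff the input is empty.
def Pre_solution (sequence : List Int) : Prop := sequence ≠ []
instance (sequence : List Int) : Decidable (Pre_solution sequence) := by unfold Pre_solution; infer_instance
def pvWitness_solution : List Int := [1, -2, 3]

def Spec_solution (sequence : List Int) (out : Int) : Prop := out = solution_alt sequence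
instance (sequence : List Int) (out : Int) : Decidable (Spec_solution sequence out) := by unfold Spec_solution; infer_instance

-- ===== CLAIM (what is proved, stated in full; the proofs are below) =====
def Claim_equal_solution : Prop := ∀ (sequence : List Int), Dom_solution sequence → Pre_solution sequence → Spec_solution sequence (solution sequence)

-- ===== LEMMAS AND PROOFS =====

-- the alternating-sign transform: altmap s [x0,x1,x2,…] = [s*x0, -s*x1, s*x2, …]
def altmap (s : Int) : List Int → List Int
  | [] => []
  | x :: xs => s * x :: altmap (-s) xs

-- one dp step of A, state = (dp_n reversed, dp_p reversed), input = the p-value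
def stepA (st : List Int × List Int) (v : Int) : List Int × List Int :=
  (max (-v) (st.1.headD 0 + -v) :: st.1, max v (st.2.headD 0 + v) :: st.2)

-- prefix sums: prefs t [v1,v2,…] = [t+v1, t+v1+v2, …]
def prefs (t : Int) : List Int → List Int
  | [] => []
  | v :: q => (t + v) :: prefs (t + v) q

-- running (current prefix, min of earlier prefixes, max of earlier prefixes)
def scan3 (t mp Mp : Int) : List Int → Int × Int × Int
  | [] => (t, mp, Mp)
  | v :: q => scan3 (t + v) (min mp t) (max Mp t) q

theorem altmap_length (xs : List Int) : ∀ s, (altmap s xs).length = xs.length := by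
  induction xs with
  | nil => intro s; rfl
  | cons x xs ih => intro s; simp [altmap, ih]

theorem altmap_getElem (xs : List Int) : ∀ (s : Int) (k : Nat) (h : k < xs.length),
    (altmap s xs)[k]'(by rw [altmap_length]; exact h) = (if k % 2 = 0 then s else -s) * xs[k] := by
  induction xs with
  | nil => intro s k h; simp at h
  | cons x xs ih =>
    intro s k h
    cases k with
    | zero => simp [altmap]
    | succ k =>
      have hk : k < xs.length := by simpa using h
      have := ih (-s) k hk
      simp only [altmap, List.getElem_cons_succ]
      rw [this]
      rcases Nat.mod_two_eq_zero_or_one k with hp | hp <;>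
        simp [hp, Nat.succ_mod_two_eq_zero_iff]

theorem altmap_neg (xs : List Int) : ∀ s, altmap (-s) xs = (altmap s xs).map (fun y => -y) := by
  induction xs with
  | nil => intro s; rfl
  | cons x xs ih =>
    intro s
    simp only [altmap, List.map_cons, neg_neg]
    rw [ih s]
    simp [neg_mul, List.map_map]

theorem foldl_max_out (t : List Int) : ∀ a b : Int, t.foldl max (max a b) = max a (t.foldl max b) := by
  induction t with
  | nil => intro a b; rfl
  | cons x t ih =>
    intro a b
    simp only [List.foldl_cons]
    rw [max_assoc, ih]

theorem foldl_max_middle (l1 l2 : List Int) (x a : Int) :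
    (l1 ++ x :: l2).foldl max a = max x ((l1 ++ l2).foldl max a) := by
  induction l1 generalizing a with
  | nil =>
    simp only [List.nil_append, List.foldl_cons]
    rw [max_comm a x, foldl_max_out]
  | cons y l1 ih =>
    simp only [List.cons_append, List.foldl_cons]
    exact ih (max a y)

-- A's comprehensions are the alternating transform and its negation
theorem pseq_eq (xs : List Int) :
    (PySem.List.pyRange 0 (xs.length : Int) 1).map
      (fun i => PySem.List.pyGetD ([1, -1] : List Int) (PySem.Int.mod i 2) 0 * PySem.List.pyGetD xs i 0)
      = altmap 1 xs := by
  apply List.ext_getElem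
  · simp [PySem.List.length_pyRange_one, altmap_length]
  · intro k h1 h2
    have hk : k < xs.length := by simpa [altmap_length] using h2
    rw [altmap_getElem xs 1 k hk]
    rw [List.getElem_map]
    rw [PySem.List.getElem_pyRange_one]
    simp only [zero_add]
    have hm : PySem.Int.mod (k : Int) 2 = ((k % 2 : Nat) : Int) := by
      exact_mod_cast PySem.Int.mod_natCast k 2
    rw [hm, PySem.List.pyGetD_natCast, PySem.List.pyGetD_natCast]
    rcases Nat.mod_two_eq_zero_or_one k with hp | hp <;>
      simp [hp, List.getD, hk]

theorem nseq_eq (xs : List Int) :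
    (PySem.List.pyRange 0 (xs.length : Int) 1).map
      (fun i => PySem.List.pyGetD ([1, -1] : List Int) (PySem.Int.mod i 2 - 1) 0 * PySem.List.pyGetD xs i 0)
      = altmap (-1) xs := by
  apply List.ext_getElem
  · simp [PySem.List.length_pyRange_one, altmap_length]
  · intro k h1 h2
    have hk : k < xs.length := by simpa [altmap_length] using h2
    rw [altmap_getElem xs (-1) k hk]
    rw [List.getElem_map]
    rw [PySem.List.getElem_pyRange_one]
    simp only [zero_add]
    have hm : PySem.Int.mod (k : Int) 2 = ((k % 2 : Nat) : Int) := by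
      exact_mod_cast PySem.Int.mod_natCast k 2
    rw [hm, PySem.List.pyGetD_natCast]
    rcases Nat.mod_two_eq_zero_or_one k with hp | hp <;>
      simp [hp, List.getD, hk, PySem.List.pyGetD_neg_one, PySem.List.pyGetD_zero_cons]

-- A's index loop over both comprehensions is stepA over the transformed tail
theorem afold (P : List Int) (init : List Int × List Int) :
    (PySem.List.pyRange 1 ((P.map (fun y => -y)).length : Int) 1).foldl
      (fun (st : List Int × List Int) i =>
        (max (PySem.List.pyGetD (P.map (fun y => -y)) i 0)
            (st.1.headD 0 + PySem.List.pyGetD (P.map (fun y => -y)) i 0) :: st.1,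
         max (PySem.List.pyGetD P i 0) (st.2.headD 0 + PySem.List.pyGetD P i 0) :: st.2))
      init
    = (P.drop 1).foldl stepA init := by
  rw [List.length_map]
  rw [PySem.List.foldl_congr_mem _ _ (fun (st : List Int × List Int) i =>
      (max (-(PySem.List.pyGetD P i 0)) (st.1.headD 0 + -(PySem.List.pyGetD P i 0)) :: st.1,
       max (PySem.List.pyGetD P i 0) (st.2.headD 0 + PySem.List.pyGetD P i 0) :: st.2)) init ?_]
  · exact PySem.List.foldl_pyRange_pyGetD' P 0 stepA init (by norm_num)
  · intro acc i hi
    obtain ⟨ha, hb⟩ := PySem.List.mem_pyRange_one.mp hi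
    rw [PySem.List.pyGetD_eq_getElem _ 0 (by omega) (by simpa using hb), List.getElem_map,
      ← PySem.List.pyGetD_eq_getElem P 0 (by omega) hb]

-- B's fold appends exactly the prefix sums of the alternating transform
theorem bfold (xs : List Int) : ∀ (t : Int) (pref : List Int) (s : Int),
    ((xs.foldl
      (fun (st : Int × List Int × Int) x =>
        let t := st.1 + st.2.2 * x
        (t, st.2.1 ++ [t], -st.2.2))
      (t, pref, s)).2.1) = pref ++ prefs t (altmap s xs) := by
  induction xs with
  | nil => intro t pref s; simp [prefs, altmap]
  | cons x xs ih =>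
    intro t pref s
    simp only [List.foldl_cons, altmap, prefs]
    rw [ih]
    simp

-- main invariant: A's dp fold tracks the running prefix extrema
theorem mainInv (q : List Int) : ∀ (t mp Mp : Int) (t1 t2 : List Int)
    (h : (t1 ++ (t - mp) :: t2).foldl max (Mp - t) = max Mp t - min mp t),
    ∃ t1' t2',
      q.foldl stepA ((Mp - t) :: t1, (t - mp) :: t2) =
        (((scan3 t mp Mp q).2.2 - (scan3 t mp Mp q).1) :: t1',
         ((scan3 t mp Mp q).1 - (scan3 t mp Mp q).2.1) :: t2') ∧
      (t1' ++ ((scan3 t mp Mp q).1 - (scan3 t mp Mp q).2.1) :: t2').foldl max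
          ((scan3 t mp Mp q).2.2 - (scan3 t mp Mp q).1)
        = max (scan3 t mp Mp q).2.2 (scan3 t mp Mp q).1
          - min (scan3 t mp Mp q).2.1 (scan3 t mp Mp q).1 := by
  induction q with
  | nil =>
    intro t mp Mp t1 t2 h
    exact ⟨t1, t2, rfl, h⟩
  | cons v q ih =>
    intro t mp Mp t1 t2 h
    have hA : stepA ((Mp - t) :: t1, (t - mp) :: t2) v =
        ((max Mp t - (t + v)) :: (Mp - t) :: t1, ((t + v) - min mp t) :: (t - mp) :: t2) := by
      have h1 : max (-v) (Mp - t + -v) = max Mp t - (t + v) := by omega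
      have h2 : max v (t - mp + v) = (t + v) - min mp t := by omega
      show stepA _ v = _
      simp only [stepA, List.headD]
      rw [h1, h2]
    simp only [List.foldl_cons, hA, scan3]
    
    apply ih
    show (((Mp - t) :: t1) ++ ((t + v) - min mp t) :: (t - mp) :: t2).foldl max
        (max Mp t - (t + v)) = max (max Mp t) (t + v) - min (min mp t) (t + v)
    rw [foldl_max_middle]
    simp only [List.cons_append, List.foldl_cons]
    rw [foldl_max_out, h]
    omega

-- prefix extrema of prefs equal the scan3 components
theorem prefs_max (q : List Int) : ∀ (t mp Mp : Int),
    (prefs t q).foldl max (max Mp t) = max (scan3 t mp Mp q).2.2 (scan3 t mp Mp q).1 := by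
  induction q with
  | nil => intro t mp Mp; rfl
  | cons v q ih =>
    intro t mp Mp
    simp only [prefs, scan3, List.foldl_cons]
    exact ih (t + v) (min mp t) (max Mp t)

theorem prefs_min (q : List Int) : ∀ (t mp Mp : Int),
    (prefs t q).foldl min (min mp t) = min (scan3 t mp Mp q).2.1 (scan3 t mp Mp q).1 := by
  induction q with
  | nil => intro t mp Mp; rfl
  | cons v q ih =>
    intro t mp Mp
    simp only [prefs, scan3, List.foldl_cons]
    exact ih (t + v) (min mp t) (max Mp t)

-- ===== VERDICT (by name: the statement is the Claim_ definition above) =====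
theorem solution_spec : Claim_equal_solution := by
  intro sequence hdom hpre
  obtain ⟨x, rest, rfl⟩ := List.exists_cons_of_ne_nil hpre
  show solution (x :: rest) = solution_alt (x :: rest)
  simp only [solution, solution_alt]
  rw [nseq_eq, pseq_eq]
  rw [altmap_neg (x :: rest) 1]
  rw [afold]
  have hP : altmap 1 (x :: rest) = x :: altmap (-1) rest := by simp [altmap]
  rw [hP]
  simp only [List.map_cons, List.drop_succ_cons, List.drop_zero, PySem.List.pyGetD_zero_cons]
  have hbase : (([] : List Int) ++ (x - 0) :: []).foldl max ((0 : Int) - x) = max 0 x - min 0 x := by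
    simp only [List.nil_append, List.foldl_cons, List.foldl_nil]
    omega
  obtain ⟨t1', t2', heq, hm⟩ := mainInv (altmap (-1) rest) x 0 0 [] [] (by
    simpa using hbase)
  have heq' : (altmap (-1) rest).foldl stepA ([-x], [x]) =
      (((scan3 x 0 0 (altmap (-1) rest)).2.2 - (scan3 x 0 0 (altmap (-1) rest)).1) :: t1',
       ((scan3 x 0 0 (altmap (-1) rest)).1 - (scan3 x 0 0 (altmap (-1) rest)).2.1) :: t2') := by
    have : ([-x], [x]) = (((0 : Int) - x) :: ([] : List Int), (x - 0) :: ([] : List Int)) := by norm_num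
    rw [this]; exact heq
  rw [heq']
  -- B side
  rw [bfold (x :: rest) 0 [0] 1, hP]
  simp only [prefs, zero_add, List.cons_append, List.nil_append]
  have hmax : (prefs x (altmap (-1) rest)).foldl max (max 0 x)
      = max (scan3 x 0 0 (altmap (-1) rest)).2.2 (scan3 x 0 0 (altmap (-1) rest)).1 :=
    prefs_max (altmap (-1) rest) x 0 0
  have hmin : (prefs x (altmap (-1) rest)).foldl min (min 0 x)
      = min (scan3 x 0 0 (altmap (-1) rest)).2.1 (scan3 x 0 0 (altmap (-1) rest)).1 :=
    prefs_min (altmap (-1) rest) x 0 0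
  simp only [PySem.List.max?_id_cons, PySem.List.min?_id_cons, Option.getD_some, List.foldl_cons]
  rw [hm, hmax, hmin]
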